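-- pv_equiv track=rewrite | github.com/jossteeven/outset_medical_code_interview | src/second_exercise.py | index_of_subarray
-- ===== SOURCE A (Python) =====
-- def index_of_subarray(array_a, array_b):
--
--     '''This function will search the first occurence of a small collection of elements (array_a) inside another collection of elements (array_b)
--
--         Args    array_a:     collection of elements to search inside array_b
--                 array_b:     collection of elements where array_a will be found
--
--         Return  <integer>   index of first element of the small collection if found
--                 <-1>        if the small collection is not found
--     '''
--     search_occurences = 0
--
--     for b_element_index in range(len(array_b)) :
--         for a_element_index in range(len(array_a)):
--             iterable_position = b_element_index+a_element_index
--             if iterable_position < len(array_b):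
--                 if array_a[a_element_index]==array_b[iterable_position]:
--                     search_occurences+=1
--                     if search_occurences == len (array_a):
--                         return b_element_index
--         search_occurences = 0
--     return -1
-- ===== SOURCE B (Python) =====
-- def index_of_subarray(array_a, array_b):
--     '''First index i with array_b[i:i+len(array_a)] == array_a, else -1.
--     An empty array_a matches at index 0 (cf. str.find('') == 0).'''
--     m = len(array_a)
--     for i in range(len(array_b) - m + 1):
--         if array_b[i:i+m] == array_a:
--             return i
--     return -1
-- ===== Notes on version B (the rewrite author's own statement) =====
-- stated objective: idiomatic
-- what changed: Replaces the nested per-position match-counting loops (whose inner loop always runs to the end of array_a) with a single bounded loop doing one slice comparison per start index, the way an experienced Python developer writes subarray search.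
-- intended difference: When array_a is empty, A returns -1 because its success check sits inside an unreachable match branch, while B returns 0: the empty sequence occurs at index 0 (as with str.find('')), which is the intended value. — e.g. on index_of_subarray([], [1]): A returns -1, B returns 0
import Mathlib
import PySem

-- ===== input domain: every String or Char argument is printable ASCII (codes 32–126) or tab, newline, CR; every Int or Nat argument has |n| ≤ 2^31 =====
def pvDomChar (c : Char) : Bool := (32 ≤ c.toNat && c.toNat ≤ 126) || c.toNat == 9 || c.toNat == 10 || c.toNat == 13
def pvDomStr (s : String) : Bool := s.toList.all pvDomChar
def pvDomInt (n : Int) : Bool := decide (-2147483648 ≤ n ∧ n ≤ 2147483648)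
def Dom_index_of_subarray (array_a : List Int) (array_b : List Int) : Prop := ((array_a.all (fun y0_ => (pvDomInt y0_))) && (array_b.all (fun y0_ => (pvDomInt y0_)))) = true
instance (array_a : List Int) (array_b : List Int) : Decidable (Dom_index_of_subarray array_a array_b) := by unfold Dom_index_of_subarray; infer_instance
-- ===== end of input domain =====

-- B replaces A's nested match-counting loops by one slice comparison per start index (idiomatic);
-- on empty array_a A returns -1 and B returns 0 (stated as D_ below).

-- ===== PORT A =====
-- inner 'for a_element_index in range(len(array_a))' loop: recursion over the remaining
-- elements of array_a carrying a_element_index and search_occurences; 'return' = some.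
def pvInnerA (b : List Int) (bIdx lenA : Nat) : List Int → Nat → Nat → Option Int
  | [], _, _ => none
  | ae :: rest, aIdx, occ =>
    if bIdx + aIdx < b.length then
      if ae = b.getD (bIdx + aIdx) 0 then
        if occ + 1 = lenA then some ((bIdx : Int))
        else pvInnerA b bIdx lenA rest (aIdx + 1) (occ + 1)
      else pvInnerA b bIdx lenA rest (aIdx + 1) occ
    else pvInnerA b bIdx lenA rest (aIdx + 1) occ

-- outer 'for b_element_index in range(len(array_b))' loop (search_occurences restarts at 0 each pass)
def pvOuterA (a b : List Int) : List Nat → Int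
  | [] => -1
  | bIdx :: rest =>
    match pvInnerA b bIdx a.length a 0 0 with
    | some r => r
    | none => pvOuterA a b rest

def index_of_subarray (array_a : List Int) (array_b : List Int) : Int :=
  pvOuterA array_a array_b (List.range array_b.length)

-- ===== PORT B =====
-- 'for i in range(len(array_b) - m + 1): if array_b[i:i+m] == array_a: return i'
def pvGoB (a b : List Int) : List Int → Int
  | [] => -1
  | i :: rest =>
    if PySem.List.slice b (some i) (some (i + (a.length : Int))) = a then i
    else pvGoB a b rest

def index_of_subarray_alt (array_a : List Int) (array_b : List Int) : Int :=
  pvGoB array_a array_b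
    (PySem.List.pyRange 0 ((array_b.length : Int) - (array_a.length : Int) + 1) 1)

-- ===== PRECONDITION & SPEC =====
-- On empty array_a, A returns -1 (its success check is unreachable) while B returns 0:
-- the empty subarray occurs at index 0 (as with str.find('')), which is the intended value.
def D_index_of_subarray (array_a : List Int) (array_b : List Int) : Prop := array_a = []
instance (array_a : List Int) (array_b : List Int) : Decidable (D_index_of_subarray array_a array_b) := by
  unfold D_index_of_subarray; infer_instance

def Spec_index_of_subarray (array_a : List Int) (array_b : List Int) (out : Int) : Prop :=
  ¬ D_index_of_subarray array_a array_b → out = index_of_subarray_alt array_a array_b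
instance (array_a : List Int) (array_b : List Int) (out : Int) : Decidable (Spec_index_of_subarray array_a array_b out) := by
  unfold Spec_index_of_subarray; infer_instance

def pvDiffWitness_index_of_subarray : List Int × List Int := ([], [1])
def pvDiffWitnessOut_index_of_subarray : Int × Int := (-1, 0)

-- ===== CLAIM (what is proved, stated in full; the proofs are below) =====
def Claim_unchanged_index_of_subarray : Prop := ∀ (array_a : List Int) (array_b : List Int), Dom_index_of_subarray array_a array_b → Spec_index_of_subarray array_a array_b (index_of_subarray array_a array_b)
def Claim_changed_index_of_subarray : Prop := Dom_index_of_subarray (pvDiffWitness_index_of_subarray.1) (pvDiffWitness_index_of_subarray.2) ∧ D_index_of_subarray (pvDiffWitness_index_of_subarray.1) (pvDiffWitness_index_of_subarray.2) ∧ index_of_subarray (pvDiffWitness_index_of_subarray.1) (pvDiffWitness_index_of_subarray.2) = pvDiffWitnessOut_index_of_subarray.1 ∧ index_of_subarray_alt (pvDiffWitness_index_of_subarray.1) (pvDiffWitness_index_of_subarray.2) = pvDiffWitnessOut_index_of_subarray.2 ∧ pvDiffWitnessOut_index_of_subarray.1 ≠ pvDiffWitnessOut_index_of_subarray.2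
def Claim_exact_index_of_subarray : Prop := ∀ (array_a : List Int) (array_b : List Int), Dom_index_of_subarray array_a array_b → D_index_of_subarray array_a array_b → index_of_subarray array_a array_b ≠ index_of_subarray_alt array_a array_b

-- ===== LEMMAS AND PROOFS =====

-- reference "first index i in the list whose drop has a as a prefix"
def pvF (a b : List Int) : List Nat → Int
  | [] => -1
  | i :: rest => if a <+: b.drop i then ((i : Nat) : Int) else pvF a b rest

theorem pvInnerA_dead (b : List Int) (bIdx lenA : Nat) :
    ∀ (rest : List Int) (aIdx occ : Nat), occ + rest.length < lenA →
      pvInnerA b bIdx lenA rest aIdx occ = none := by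
  intro rest
  induction rest with
  | nil => intro aIdx occ h; simp [pvInnerA]
  | cons ae r ih =>
    intro aIdx occ h
    simp only [List.length_cons] at h
    simp only [pvInnerA]
    split_ifs with h1 h2 h3
    · omega
    · exact ih (aIdx + 1) (occ + 1) (by omega)
    · exact ih (aIdx + 1) occ (by omega)
    · exact ih (aIdx + 1) occ (by omega)

theorem pvInnerA_live (b : List Int) (bIdx lenA : Nat) :
    ∀ (rest : List Int) (aIdx occ : Nat), occ + rest.length = lenA → rest ≠ [] →
      pvInnerA b bIdx lenA rest aIdx occ =
        (if rest <+: b.drop (bIdx + aIdx) then some ((bIdx : Int)) else none) := by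
  intro rest
  induction rest with
  | nil => intro _ _ _ hne; exact absurd rfl hne
  | cons ae r ih =>
    intro aIdx occ hlen _
    simp only [List.length_cons] at hlen
    simp only [pvInnerA]
    by_cases hin : bIdx + aIdx < b.length
    · have hget : b.getD (bIdx + aIdx) 0 = b[bIdx + aIdx] := List.getD_eq_getElem b 0 hin
      rw [if_pos hin, hget]
      by_cases heq : ae = b[bIdx + aIdx]
      · rw [if_pos heq]
        by_cases hend : occ + 1 = lenA
        · rw [if_pos hend]
          have hr : r = [] := List.eq_nil_of_length_eq_zero (by omega)
          subst hr
          have hp : ae :: ([] : List Int) <+: b.drop (bIdx + aIdx) := by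
            rw [List.drop_eq_getElem_cons hin, heq]
            exact List.cons_prefix_cons.mpr ⟨rfl, List.nil_prefix⟩
          rw [if_pos hp]
        · rw [if_neg hend]
          have hrne : r ≠ [] := by
            intro hnil; subst hnil; simp at hlen; omega
          rw [ih (aIdx + 1) (occ + 1) (by omega) hrne,
              show bIdx + (aIdx + 1) = bIdx + aIdx + 1 by omega]
          have hiff : (r <+: b.drop (bIdx + aIdx + 1)) ↔ (ae :: r <+: b.drop (bIdx + aIdx)) := by
            rw [List.drop_eq_getElem_cons hin, List.cons_prefix_cons]
            constructor
            · intro h; exact ⟨heq, h⟩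
            · intro h; exact h.2
          rw [if_congr hiff rfl rfl]
      · rw [if_neg heq, pvInnerA_dead b bIdx lenA r (aIdx + 1) occ (by omega)]
        have hnp : ¬ (ae :: r <+: b.drop (bIdx + aIdx)) := by
          rw [List.drop_eq_getElem_cons hin, List.cons_prefix_cons]
          intro h; exact heq h.1
        rw [if_neg hnp]
    · rw [if_neg hin, pvInnerA_dead b bIdx lenA r (aIdx + 1) occ (by omega)]
      have hdrop : b.drop (bIdx + aIdx) = [] := List.drop_eq_nil_of_le (by omega)
      rw [if_neg (by rw [hdrop]; simp)]

theorem pvOuterA_eq_pvF (a b : List Int) (hne : a ≠ []) :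
    ∀ l : List Nat, pvOuterA a b l = pvF a b l := by
  intro l
  induction l with
  | nil => simp [pvOuterA, pvF]
  | cons i rest ih =>
    simp only [pvOuterA, pvF]
    rw [pvInnerA_live b i a.length a 0 0 (by simp) hne]
    simp only [Nat.add_zero]
    by_cases h : a <+: b.drop i
    · simp [h]
    · simp only [if_neg h]
      exact ih

theorem pvOuterA_empty (b : List Int) : ∀ l : List Nat, pvOuterA [] b l = -1 := by
  intro l
  induction l with
  | nil => rfl
  | cons i rest ih => simpa [pvOuterA, pvInnerA] using ih

theorem take_eq_iff_prefix (a l : List Int) : l.take a.length = a ↔ a <+: l := by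
  constructor
  · intro h; rw [← h]; exact List.take_prefix _ _
  · intro h
    have := (List.prefix_iff_eq_take).mp h
    exact this.symm

theorem pvGoB_map (a b : List Int) :
    ∀ l : List Nat, pvGoB a b (l.map (fun k => ((k : Nat) : Int))) = pvF a b l := by
  intro l
  induction l with
  | nil => rfl
  | cons i rest ih =>
    simp only [List.map_cons, pvGoB, pvF]
    rw [PySem.List.slice_natCast_add]
    by_cases h : a <+: b.drop i
    · rw [if_pos ((take_eq_iff_prefix a (b.drop i)).mpr h), if_pos h]
    · rw [if_neg (fun hc => h ((take_eq_iff_prefix a (b.drop i)).mp hc)), if_neg h]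
      exact ih

theorem pvF_append_fail (a b : List Int) (l2 : List Nat)
    (hfail : ∀ i ∈ l2, ¬ a <+: b.drop i) :
    ∀ l1 : List Nat, pvF a b (l1 ++ l2) = pvF a b l1 := by
  intro l1
  induction l1 with
  | nil =>
    simp only [List.nil_append]
    induction l2 with
    | nil => rfl
    | cons i rest ih =>
      simp only [pvF, if_neg (hfail i (by simp))]
      exact ih (fun j hj => hfail j (by simp [hj]))
  | cons i rest ih =>
    simp only [List.cons_append, pvF]
    by_cases h : a <+: b.drop i
    · rw [if_pos h, if_pos h]
    · rw [if_neg h, if_neg h]; exact ih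

theorem pvF_long_fail (a b : List Int) (i : Nat) (h : b.length - i < a.length) :
    ¬ a <+: b.drop i := by
  intro hp
  have := hp.length_le
  simp [List.length_drop] at this
  omega

-- ===== VERDICT (by name: the statement is the Claim_ definition above) =====
theorem index_of_subarray_spec : Claim_unchanged_index_of_subarray := by
  intro a b _ hD
  have hne : a ≠ [] := hD
  have hm : 1 ≤ a.length := by
    cases a with
    | nil => exact absurd rfl hne
    | cons x xs => simp
  unfold index_of_subarray index_of_subarray_alt
  rw [pvOuterA_eq_pvF a b hne]
  set n := b.length with hn
  set m := a.length with hmdef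
  by_cases hK : (n : Int) - (m : Int) + 1 ≤ 0
  · -- empty range on B's side; every start index fails on A's side
    rw [PySem.List.pyRange_one_eq_nil hK]
    have : pvF a b (List.range n) = pvF a b ([] ++ List.range n) := by simp
    rw [this, pvF_append_fail a b (List.range n)
      (fun i hi => pvF_long_fail a b i (by simp at hi; omega))]
    rfl
  · rw [not_le] at hK
    have hKn : ((n : Int) - (m : Int) + 1).toNat = n - m + 1 := by omega
    have hle : n - m + 1 ≤ n := by omega
    have hsplit : List.range n = List.range (n - m + 1) ++
        (List.range (n - (n - m + 1))).map (fun k => (n - m + 1) + k) := by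
      rw [← List.range_add]
      congr 1
      omega
    rw [hsplit, pvF_append_fail a b _ (by
      intro i hi
      simp only [List.mem_map, List.mem_range] at hi
      obtain ⟨k, hk, rfl⟩ := hi
      exact pvF_long_fail a b _ (by omega))]
    have hpr : PySem.List.pyRange 0 ((n : Int) - (m : Int) + 1) 1 =
        (List.range (n - m + 1)).map (fun k => ((k : Nat) : Int)) := by
      rw [PySem.List.pyRange_one]
      simp [hKn]
    rw [hpr, pvGoB_map]

theorem index_of_subarray_changed : Claim_changed_index_of_subarray := by
  unfold Claim_changed_index_of_subarray; decide

theorem index_of_subarray_tight : Claim_exact_index_of_subarray := by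
  intro a b _ hD
  have ha : a = [] := hD
  subst ha
  unfold index_of_subarray index_of_subarray_alt
  rw [pvOuterA_empty]
  have hpos : (0 : Int) < (b.length : Int) - 0 + 1 := by omega
  rw [PySem.List.pyRange_one_cons (by simp)]
  simp only [pvGoB]
  rw [if_pos (by simp [PySem.List.slice, PySem.List.clampIdx])]
  decide
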